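-- pv_equiv track=rewrite | github.com/miliar/Code_Jam_Webscraper | solutions_python/Problem_155/2961.py | ticketToTheGala
-- ===== SOURCE A (Python) =====
-- def ticketToTheGala(S_max, S_i):
--     C = 0
--     up = S_i[0]
--
--     for i in range(1, S_max+1):
--         diff = i - up
--         up += S_i[i]
--
--         if diff > 0:
--             C += diff
--             up += diff
--
--     return C
-- ===== SOURCE B (Python) =====
-- def ticketToTheGala(S_max, S_i):
--     # Pass 1: prefix sums of the original S_i values (purchases never fed back in).
--     prefix = S_i[0]
--     prefixes = []
--     for i in range(1, S_max + 1):
--         prefixes.append(prefix)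
--         prefix += S_i[i]
--     # Pass 2: the answer is the largest shortfall i - (sum of the first i stages), floored at 0.
--     return max([0] + [i - p for i, p in enumerate(prefixes, 1)])
-- ===== Notes on version B (the rewrite author's own statement) =====
-- stated objective: simpler
-- what changed: B replaces A's single loop with a self-referential accumulator (purchased tickets fed back into the running total) by two staged passes: first a list of prefix sums of the original S_i, then max over the enumerated shortfalls i - prefix, floored at 0.
import Mathlib
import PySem

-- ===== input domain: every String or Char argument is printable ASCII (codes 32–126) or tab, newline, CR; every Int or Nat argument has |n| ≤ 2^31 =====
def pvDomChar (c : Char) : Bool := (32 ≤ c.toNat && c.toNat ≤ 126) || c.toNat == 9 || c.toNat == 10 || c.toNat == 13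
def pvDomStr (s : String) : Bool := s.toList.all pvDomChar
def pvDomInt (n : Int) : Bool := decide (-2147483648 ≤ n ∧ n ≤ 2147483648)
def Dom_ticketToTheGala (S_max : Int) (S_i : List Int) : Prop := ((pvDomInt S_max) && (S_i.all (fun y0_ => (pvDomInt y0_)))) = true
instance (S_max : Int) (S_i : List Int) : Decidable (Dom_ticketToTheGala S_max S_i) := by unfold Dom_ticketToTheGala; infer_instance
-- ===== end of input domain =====

-- B is simpler: instead of A's single loop with a self-referential running total
-- (purchased tickets fed back into the accumulator), B first lists the prefix sums
-- of the original S_i and then returns the largest shortfall i - prefix, floored at 0.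

-- ===== PORT A =====
def ticketToTheGala (S_max : Int) (S_i : List Int) : Int :=
  let st := (PySem.List.pyRange 1 (S_max + 1) 1).foldl
    (fun (cu : Int × Int) i =>
      let diff := i - cu.2
      let up := cu.2 + PySem.List.pyGetD S_i i 0
      if diff > 0 then (cu.1 + diff, up + diff) else (cu.1, up))
    (0, PySem.List.pyGetD S_i 0 0)
  st.1

-- ===== PORT B =====
-- Pass 1 builds the list of prefix sums; pass 2 is `max([0] + [i - p for i, p in
-- enumerate(prefixes, 1)])`, ported with PySem.List.enumerate (start 1) and max?.
def ticketToTheGala_alt (S_max : Int) (S_i : List Int) : Int :=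
  let st := (PySem.List.pyRange 1 (S_max + 1) 1).foldl
    (fun (pp : List Int × Int) i =>
      (pp.1 ++ [pp.2], pp.2 + PySem.List.pyGetD S_i i 0))
    (([] : List Int), PySem.List.pyGetD S_i 0 0)
  let needs := (PySem.List.enumerate st.1 1).map (fun ip => ip.1 - ip.2)
  match PySem.List.max? ((0 : Int) :: needs) (fun y => y) with
  | some v => v
  | none => 0

-- ===== PRECONDITION & SPEC =====
-- Pre_ excludes exactly the inputs on which Python A raises IndexError: an empty
-- S_i (S_i[0]) or S_max reaching past the end of S_i (S_i[i] for some i ≤ S_max).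
def Pre_ticketToTheGala (S_max : Int) (S_i : List Int) : Prop :=
  S_i ≠ [] ∧ S_max < (S_i.length : Int)
instance (S_max : Int) (S_i : List Int) : Decidable (Pre_ticketToTheGala S_max S_i) := by
  unfold Pre_ticketToTheGala; infer_instance
def pvWitness_ticketToTheGala : Int × List Int := (2, [3, 0, 0])

def Spec_ticketToTheGala (S_max : Int) (S_i : List Int) (out : Int) : Prop := out = ticketToTheGala_alt S_max S_i
instance (S_max : Int) (S_i : List Int) (out : Int) : Decidable (Spec_ticketToTheGala S_max S_i out) := by unfold Spec_ticketToTheGala; infer_instance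

-- ===== CLAIM (what is proved, stated in full; the proofs are below) =====
def Claim_equal_ticketToTheGala : Prop := ∀ (S_max : Int) (S_i : List Int), Dom_ticketToTheGala S_max S_i → Pre_ticketToTheGala S_max S_i → Spec_ticketToTheGala S_max S_i (ticketToTheGala S_max S_i)

-- ===== LEMMAS AND PROOFS =====

-- Joint loop invariant over the shared index range 1..n: writing (C, up) for A's
-- state and (prefixes, prefix) for B's, we have up = prefix + C, prefixes has one
-- entry per completed iteration, and C is the running maximum (floored at 0) of
-- the shortfalls read off from the enumerated prefix list.
theorem tttg_invariant (S_i : List Int) (n : Nat) :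
    ((PySem.List.pyRange 1 ((n : Int) + 1) 1).foldl
        (fun (cu : Int × Int) i =>
          if i - cu.2 > 0 then
            (cu.1 + (i - cu.2), cu.2 + PySem.List.pyGetD S_i i 0 + (i - cu.2))
          else (cu.1, cu.2 + PySem.List.pyGetD S_i i 0))
        (0, PySem.List.pyGetD S_i 0 0)).2
      = ((PySem.List.pyRange 1 ((n : Int) + 1) 1).foldl
          (fun (pp : List Int × Int) i => (pp.1 ++ [pp.2], pp.2 + PySem.List.pyGetD S_i i 0))
          ([], PySem.List.pyGetD S_i 0 0)).2
        + ((PySem.List.pyRange 1 ((n : Int) + 1) 1).foldl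
            (fun (cu : Int × Int) i =>
              if i - cu.2 > 0 then
                (cu.1 + (i - cu.2), cu.2 + PySem.List.pyGetD S_i i 0 + (i - cu.2))
              else (cu.1, cu.2 + PySem.List.pyGetD S_i i 0))
            (0, PySem.List.pyGetD S_i 0 0)).1
    ∧ ((PySem.List.pyRange 1 ((n : Int) + 1) 1).foldl
          (fun (pp : List Int × Int) i => (pp.1 ++ [pp.2], pp.2 + PySem.List.pyGetD S_i i 0))
          ([], PySem.List.pyGetD S_i 0 0)).1.length = n
    ∧ ((PySem.List.pyRange 1 ((n : Int) + 1) 1).foldl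
        (fun (cu : Int × Int) i =>
          if i - cu.2 > 0 then
            (cu.1 + (i - cu.2), cu.2 + PySem.List.pyGetD S_i i 0 + (i - cu.2))
          else (cu.1, cu.2 + PySem.List.pyGetD S_i i 0))
        (0, PySem.List.pyGetD S_i 0 0)).1
      = ((PySem.List.enumerate
            ((PySem.List.pyRange 1 ((n : Int) + 1) 1).foldl
              (fun (pp : List Int × Int) i => (pp.1 ++ [pp.2], pp.2 + PySem.List.pyGetD S_i i 0))
              ([], PySem.List.pyGetD S_i 0 0)).1 1).map
          (fun ip => ip.1 - ip.2)).foldl max 0 := by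
  induction n with
  | zero =>
    simp
  | succ n ih =>
    have hsplit : PySem.List.pyRange 1 ((n.succ : Int) + 1) 1
        = PySem.List.pyRange 1 ((n : Int) + 1) 1 ++ [(n : Int) + 1] := by
      have := PySem.List.pyRange_one_succ_right (a := 1) (b := (n : Int) + 1) (by omega)
      push_cast
      push_cast at this
      exact this
    obtain ⟨h1, h2, h3⟩ := ih
    rw [hsplit]
    simp only [List.foldl_append, List.foldl_cons, List.foldl_nil]
    refine ⟨?_, by simp [h2], ?_⟩
    · split_ifs with h <;> dsimp only <;> omega
    · rw [PySem.List.enumerate_append]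
      simp only [List.map_append, List.foldl_append, h2,
        PySem.List.enumerate, List.map_cons, List.map_nil, List.foldl_cons, List.foldl_nil]
      split_ifs with h <;> dsimp only <;> omega

-- ===== VERDICT (by name: the statement is the Claim_ definition above) =====
theorem ticketToTheGala_spec : Claim_equal_ticketToTheGala := by
  intro S_max S_i _ _
  unfold Spec_ticketToTheGala ticketToTheGala ticketToTheGala_alt
  by_cases hneg : S_max ≤ 0
  · rw [PySem.List.pyRange_one_eq_nil (by omega : S_max + 1 ≤ 1)]
    simp [PySem.List.max?]
  · obtain ⟨m, rfl⟩ : ∃ m : Nat, S_max = (m : Int) :=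
      ⟨S_max.toNat, (Int.toNat_of_nonneg (by omega)).symm⟩
    obtain ⟨h1, h2, h3⟩ := tttg_invariant S_i m
    dsimp only
    rw [PySem.List.max?_id_cons]
    dsimp only
    exact h3
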